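-- pv_equiv track=rewrite | github.com/AI45Lab/X-Boundary | R1_X_Boundary_demo.py | find_repeated_substring
-- ===== SOURCE A (Python) =====
-- def find_repeated_substring(text, min_length=3, max_length=50):
--     text = text.lower()
--     max_repeat_count = 0
--     repeated_str = ""
--
--     # 方法1: 滑动窗口
--     for length in range(min_length, min(max_length, len(text)//2)):
--         for i in range(len(text) - length*2):
--             substring = text[i:i+length]
--             if substring.isspace():  # 跳过纯空白字符
--                 continue
--
--             # 计算这个子串后面连续重复几次
--             repeat_count = 0
--             pos = i
--             while pos + length <= len(text):
--                 if text[pos:pos+length] == substring: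
--                     repeat_count += 1
--                     pos += length
--                 else:
--                     break
--
--             if repeat_count > max_repeat_count:
--                 max_repeat_count = repeat_count
--                 repeated_str = substring
--
--     return max_repeat_count >= 5, repeated_str, max_repeat_count
-- ===== SOURCE B (Python) =====
-- def _char_matches(t, L):
--     # m[j] = number of consecutive positions j, j+1, ... with t[k] == t[k+L]
--     n = len(t)
--     m = [0] * (n + 1)
--     for j in range(n - L - 1, -1, -1):
--         if t[j] == t[j + L]:
--             m[j] = m[j + 1] + 1
--     return m
--
-- def find_repeated_substring(text, min_length=3, max_length=50):
--     t = text.lower()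
--     n = len(t)
--     best_count, best_str = 0, ""
--     for L in range(min_length, min(max_length, n // 2)):
--         m = _char_matches(t, L)
--         for i in range(n - 2 * L):
--             c = 1 + m[i] // L
--             if c > best_count:
--                 s = t[i:i+L]
--                 if not s.isspace():
--                     best_count, best_str = c, s
--     return best_count >= 5, best_str, best_count
-- ===== Notes on version B (the rewrite author's own statement) =====
-- stated objective: alternative
-- what changed: Instead of rescanning block-by-block from every start with a while-loop, B precomputes per length one character-level shift-match run table (m[j] = streak of t[k]==t[k+L]) and reads each position's repeat count as 1 + m[i]//L, removing the inner rescan entirely.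
import Mathlib
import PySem

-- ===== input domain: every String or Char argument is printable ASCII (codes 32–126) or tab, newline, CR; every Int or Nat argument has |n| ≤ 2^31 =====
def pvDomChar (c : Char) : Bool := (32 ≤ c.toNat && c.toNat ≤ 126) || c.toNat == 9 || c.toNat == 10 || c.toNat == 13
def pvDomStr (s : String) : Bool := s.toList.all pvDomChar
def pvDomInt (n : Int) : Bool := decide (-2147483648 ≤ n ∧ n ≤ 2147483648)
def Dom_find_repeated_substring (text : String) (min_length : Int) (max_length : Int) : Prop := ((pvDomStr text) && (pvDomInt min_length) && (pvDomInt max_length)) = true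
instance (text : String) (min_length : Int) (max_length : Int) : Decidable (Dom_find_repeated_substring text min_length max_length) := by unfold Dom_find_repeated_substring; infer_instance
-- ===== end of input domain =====

-- B replaces A's per-start block-rescan while-loop by one character-level shift-match
-- run table per candidate length, reading each repeat count as 1 + m[i] // L.

-- ===== PORT A =====
-- the inner 'while pos + length <= len(text): …' loop of A; fuel tl.length + 1 is enough
-- for every window length ≥ 1 reached under Pre_ (each pass moves pos forward by length ≥ 1)
def pvWhileA (tl : List Char) (L : Int) (sub : List Char) : Nat → Int → Int → Int
  | 0, cnt, _ => cnt
  | fuel + 1, cnt, pos =>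
    if pos + L ≤ (tl.length : Int) then
      if PySem.List.slice tl (some pos) (some (pos + L)) = sub then
        pvWhileA tl L sub fuel (cnt + 1) (pos + L)
      else cnt
    else cnt

def find_repeated_substring (text : String) (min_length : Int) (max_length : Int) : Bool × String × Int :=
  let tl := (PySem.Str.lower text).toList
  let n : Int := tl.length
  let r := (PySem.List.pyRange min_length (min max_length (PySem.Int.floordiv n 2)) 1).foldl
    (fun st L =>
      (PySem.List.pyRange 0 (n - L * 2) 1).foldl
        (fun st2 i =>
          let substring := PySem.List.slice tl (some i) (some (i + L))
          if PySem.Chars.strIsspace substring then st2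
          else
            let repeat_count := pvWhileA tl L substring (tl.length + 1) 0 i
            if st2.1 < repeat_count then (repeat_count, substring) else st2)
        st)
    ((0 : Int), ([] : List Char))
  (decide (5 ≤ r.1), String.mk r.2, r.1)

-- ===== PORT B =====
-- port of Source B's _char_matches: m[j] = m[j+1] + 1 when t[j] == t[j+L] (indices are in
-- range for every j the countdown range visits, so pyGet? equality is Python's '==')
def pvMStep (tl : List Char) (L : Int) (m : List Int) (j : Int) : List Int :=
  if PySem.List.pyGet? tl j = PySem.List.pyGet? tl (j + L) then
    m.set j.toNat (m.getD (j + 1).toNat 0 + 1)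
  else m

def pvCharMatches (tl : List Char) (L : Int) : List Int :=
  (PySem.List.pyRange ((tl.length : Int) - L - 1) (-1) (-1)).foldl
    (pvMStep tl L) (List.replicate (tl.length + 1) 0)

def find_repeated_substring_alt (text : String) (min_length : Int) (max_length : Int) : Bool × String × Int :=
  let t := (PySem.Str.lower text).toList
  let n : Int := t.length
  let r := (PySem.List.pyRange min_length (min max_length (PySem.Int.floordiv n 2)) 1).foldl
    (fun best L =>
      let m := pvCharMatches t L
      (PySem.List.pyRange 0 (n - 2 * L) 1).foldl
        (fun best i =>
          let c := 1 + PySem.Int.floordiv (m.getD i.toNat 0) L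
          if best.1 < c then
            let s := PySem.List.slice t (some i) (some (i + L))
            if ¬ PySem.Chars.strIsspace s then (c, s) else best
          else best)
        best)
    ((0 : Int), ([] : List Char))
  (decide (5 ≤ r.1), String.mk r.2, r.1)

-- ===== PRECONDITION & SPEC =====
-- Pre_ excludes exactly the inputs on which A never returns: when some iterated window
-- length is ≤ 0 the inner while-loop advances pos by length ≤ 0 and spins forever.
def Pre_find_repeated_substring (text : String) (min_length : Int) (max_length : Int) : Prop :=
  1 ≤ min_length ∨ min max_length (PySem.Int.floordiv (PySem.Str.len text) 2) ≤ min_length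
instance (text : String) (min_length : Int) (max_length : Int) : Decidable (Pre_find_repeated_substring text min_length max_length) := by unfold Pre_find_repeated_substring; infer_instance

def pvWitness_find_repeated_substring : String × Int × Int := ("abcabcabc", 3, 50)

def Spec_find_repeated_substring (text : String) (min_length : Int) (max_length : Int) (out : Bool × String × Int) : Prop := out = find_repeated_substring_alt text min_length max_length
instance (text : String) (min_length : Int) (max_length : Int) (out : Bool × String × Int) : Decidable (Spec_find_repeated_substring text min_length max_length out) := by unfold Spec_find_repeated_substring; infer_instance

-- ===== CLAIM (what is proved, stated in full; the proofs are below) =====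
def Claim_equal_find_repeated_substring : Prop := ∀ (text : String) (min_length : Int) (max_length : Int), Dom_find_repeated_substring text min_length max_length → Pre_find_repeated_substring text min_length max_length → Spec_find_repeated_substring text min_length max_length (find_repeated_substring text min_length max_length)

-- ===== LEMMAS AND PROOFS =====

-- number of consecutive copies of the length-(Lm+1) block at position i (adjacent-block chain)
def pvCntN (tl : List Char) (Lm : Nat) (i : Nat) : Int :=
  if h : i + (Lm + 1) + (Lm + 1) ≤ tl.length ∧
      (tl.drop i).take (Lm + 1) = (tl.drop (i + (Lm + 1))).take (Lm + 1)
  then 1 + pvCntN tl Lm (i + (Lm + 1))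
  else 1
termination_by tl.length - i
decreasing_by obtain ⟨h1, -⟩ := h; omega

-- A's while-loop, rephrased on Nat positions without fuel or accumulator
def pvCntA (tl : List Char) (Lm : Nat) (sub : List Char) (pos : Nat) : Int :=
  if h : pos + (Lm + 1) ≤ tl.length then
    if (tl.drop pos).take (Lm + 1) = sub then 1 + pvCntA tl Lm sub (pos + (Lm + 1)) else 0
  else 0
termination_by tl.length - pos
decreasing_by omega

-- streak of positions j = i, i+1, … with tl[j] = tl[j + (Lm+1)] (the value of Source B's m[i])
def pvMN (tl : List Char) (Lm : Nat) (i : Nat) : Nat :=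
  if h : i + (Lm + 1) < tl.length ∧ tl.getD i ' ' = tl.getD (i + (Lm + 1)) ' '
  then pvMN tl Lm (i + 1) + 1
  else 0
termination_by tl.length - i
decreasing_by obtain ⟨h1, -⟩ := h; omega

theorem pvWhileA_eq_cntA (tl : List Char) (Lm : Nat) (sub : List Char) :
    ∀ (fuel : Nat) (pos : Nat) (cnt : Int), tl.length + 1 ≤ fuel + pos →
      pvWhileA tl ((Lm + 1 : Nat) : Int) sub fuel cnt ((pos : Nat) : Int)
        = cnt + pvCntA tl Lm sub pos := by
  intro fuel
  induction fuel with
  | zero =>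
    intro pos cnt hf
    rw [pvWhileA, pvCntA, dif_neg (by omega)]
    ring
  | succ fuel ih =>
    intro pos cnt hf
    rw [pvWhileA]
    rw [show ((pos : Int) + ((Lm + 1 : Nat) : Int)) = (((pos + (Lm + 1)) : Nat) : Int) by
      push_cast; ring]
    rw [show PySem.List.slice tl (some ((pos : Nat) : Int)) (some (((pos + (Lm + 1) : Nat)) : Int))
        = (tl.drop pos).take (Lm + 1) by
      rw [show (((pos + (Lm + 1)) : Nat) : Int) = ((pos : Int) + ((Lm + 1 : Nat) : Int)) by
        push_cast; ring]
      exact PySem.List.slice_natCast_add tl pos (Lm + 1)]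
    by_cases hle : pos + (Lm + 1) ≤ tl.length
    · rw [if_pos (by exact_mod_cast hle)]
      by_cases heq : (tl.drop pos).take (Lm + 1) = sub
      · rw [if_pos heq, ih (pos + (Lm + 1)) (cnt + 1) (by omega)]
        conv_rhs => rw [pvCntA]
        rw [dif_pos hle, if_pos heq]
        ring
      · rw [if_neg heq]
        conv_rhs => rw [pvCntA]
        rw [dif_pos hle, if_neg heq]
        ring
    · rw [if_neg (by exact_mod_cast hle)]
      conv_rhs => rw [pvCntA]
      rw [dif_neg hle]
      ring

theorem pvCntA_eq_cntN (tl : List Char) (Lm : Nat) :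
    ∀ (k pos : Nat), tl.length - pos ≤ k → pos + (Lm + 1) ≤ tl.length →
      pvCntA tl Lm ((tl.drop pos).take (Lm + 1)) pos = pvCntN tl Lm pos := by
  intro k
  induction k with
  | zero => intro pos hk hb; exact absurd hk (by omega)
  | succ k ih =>
    intro pos hk hb
    rw [pvCntA, dif_pos hb, if_pos rfl, pvCntN]
    by_cases h2 : pos + (Lm + 1) + (Lm + 1) ≤ tl.length ∧
        (tl.drop pos).take (Lm + 1) = (tl.drop (pos + (Lm + 1))).take (Lm + 1)
    · rw [dif_pos h2, h2.2, ih (pos + (Lm + 1)) (by omega) h2.1]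
    · rw [dif_neg h2, pvCntA]
      by_cases h3 : pos + (Lm + 1) + (Lm + 1) ≤ tl.length
      · rw [dif_pos h3, if_neg (fun hc => h2 ⟨h3, hc.symm⟩)]
        norm_num
      · rw [dif_neg h3]
        norm_num

-- k ≤ m[i] iff the first k shifted positions all match (and are in range)
theorem pvMN_ge_iff (tl : List Char) (Lm : Nat) :
    ∀ (k i : Nat), k ≤ pvMN tl Lm i ↔
      ∀ t, t < k → i + t + (Lm + 1) < tl.length ∧
        tl.getD (i + t) ' ' = tl.getD (i + t + (Lm + 1)) ' ' := by
  intro k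
  induction k with
  | zero => intro i; simp
  | succ k ih =>
    intro i
    rw [pvMN]
    by_cases h : i + (Lm + 1) < tl.length ∧ tl.getD i ' ' = tl.getD (i + (Lm + 1)) ' '
    · rw [dif_pos h]
      constructor
      · intro hk t ht
        rcases Nat.eq_zero_or_pos t with rfl | htp
        · simpa using h
        · have := (ih (i + 1)).mp (by omega) (t - 1) (by omega)
          constructor
          · have := this.1; omega
          · have h2 := this.2
            rw [show i + 1 + (t - 1) = i + t by omega] at h2
            exact h2
      · intro hall
        have : k ≤ pvMN tl Lm (i + 1) := by
          refine (ih (i + 1)).mpr ?_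
          intro t ht
          have := hall (t + 1) (by omega)
          rw [show i + (t + 1) = i + 1 + t by omega] at this
          exact this
        omega
    · rw [dif_neg h]
      constructor
      · omega
      · intro hall
        exact absurd (by simpa using hall 0 (by omega)) h

theorem pvMN_shift (tl : List Char) (Lm : Nat) :
    ∀ (k i : Nat), k ≤ pvMN tl Lm i → pvMN tl Lm (i + k) = pvMN tl Lm i - k := by
  intro k
  induction k with
  | zero => intro i _; simp
  | succ k ih =>
    intro i hk
    have h1 : 1 ≤ pvMN tl Lm i := by omega
    have hcond : i + (Lm + 1) < tl.length ∧ tl.getD i ' ' = tl.getD (i + (Lm + 1)) ' ' := by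
      by_contra h
      rw [pvMN, dif_neg h] at h1
      omega
    have hrec : pvMN tl Lm i = pvMN tl Lm (i + 1) + 1 := by
      rw [pvMN, dif_pos hcond]
    have := ih (i + 1) (by omega)
    rw [show i + (k + 1) = i + 1 + k by omega, this, hrec]
    omega

-- block-equality at i equals "the first Lm+1 shifted chars match", i.e. Lm+1 ≤ m[i]
theorem pvBlock_iff (tl : List Char) (Lm : Nat) (i : Nat) (hb : i + (Lm + 1) ≤ tl.length) :
    (i + (Lm + 1) + (Lm + 1) ≤ tl.length ∧
      (tl.drop i).take (Lm + 1) = (tl.drop (i + (Lm + 1))).take (Lm + 1))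
    ↔ Lm + 1 ≤ pvMN tl Lm i := by
  rw [pvMN_ge_iff]
  constructor
  · intro ⟨h2, heq⟩ t ht
    refine ⟨by omega, ?_⟩
    have h1 : ((tl.drop i).take (Lm + 1)).getD t ' ' = ((tl.drop (i + (Lm + 1))).take (Lm + 1)).getD t ' ' := by
      rw [heq]
    have e1 : ((tl.drop i).take (Lm + 1)).getD t ' ' = tl.getD (i + t) ' ' := by
      rw [List.getD_eq_getElem?_getD, List.getD_eq_getElem?_getD,
        List.getElem?_take_of_lt ht, List.getElem?_drop]
    have e2 : ((tl.drop (i + (Lm + 1))).take (Lm + 1)).getD t ' ' = tl.getD (i + (Lm + 1) + t) ' ' := by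
      rw [List.getD_eq_getElem?_getD, List.getD_eq_getElem?_getD,
        List.getElem?_take_of_lt ht, List.getElem?_drop]
    rw [e1, e2] at h1
    rw [show i + t + (Lm + 1) = i + (Lm + 1) + t by omega]
    exact h1
  · intro hall
    have h2 : i + (Lm + 1) + (Lm + 1) ≤ tl.length := by
      have := (hall Lm (by omega)).1
      omega
    refine ⟨h2, List.ext_getElem (by simp; omega) ?_⟩
    intro t h₁ h₂
    have ht : t < Lm + 1 := by
      simp only [List.length_take, List.length_drop] at h₁
      omega
    have hgd := (hall t ht).2
    have hi1 : i + t < tl.length := by omega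
    have hi2 : i + t + (Lm + 1) < tl.length := by omega
    rw [List.getD_eq_getElem tl ' ' hi1, List.getD_eq_getElem tl ' ' hi2] at hgd
    have hidx : i + (Lm + 1) + t = i + t + (Lm + 1) := by omega
    simp only [List.getElem_take, List.getElem_drop, hidx]
    exact hgd

-- A's chained repeat count equals 1 + m[i] / (Lm+1)
theorem pvCnt_eq_div (tl : List Char) (Lm : Nat) :
    ∀ (k i : Nat), tl.length - i ≤ k → i + (Lm + 1) ≤ tl.length →
      pvCntN tl Lm i = 1 + ((pvMN tl Lm i / (Lm + 1) : Nat) : Int) := by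
  intro k
  induction k with
  | zero => intro i hk hb; exact absurd hk (by omega)
  | succ k ih =>
    intro i hk hb
    rw [pvCntN]
    by_cases hc : i + (Lm + 1) + (Lm + 1) ≤ tl.length ∧
        (tl.drop i).take (Lm + 1) = (tl.drop (i + (Lm + 1))).take (Lm + 1)
    · rw [dif_pos hc]
      have hm : Lm + 1 ≤ pvMN tl Lm i := (pvBlock_iff tl Lm i hb).mp hc
      rw [ih (i + (Lm + 1)) (by omega) hc.1]
      rw [pvMN_shift tl Lm (Lm + 1) i hm]
      have hdiv : pvMN tl Lm i / (Lm + 1) = (pvMN tl Lm i - (Lm + 1)) / (Lm + 1) + 1 :=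
        Nat.div_eq_sub_div (by omega) hm
      rw [hdiv]
      push_cast
      ring
    · rw [dif_neg hc]
      have hm : pvMN tl Lm i < Lm + 1 := by
        by_contra h
        exact hc ((pvBlock_iff tl Lm i hb).mpr (by omega))
      rw [Nat.div_eq_of_lt hm]
      simp

theorem pv_getD_replicate0 (n j : Nat) : (List.replicate n (0 : Int)).getD j 0 = 0 := by
  rw [List.getD_eq_getElem?_getD, List.getElem?_replicate]
  split <;> simp

-- Source B's table fill: after the countdown loop every entry j holds m[j] = pvMN j
theorem pv_table (tl : List Char) (Lm : Nat) :
    ∀ (k : Nat) (a : Int) (m : List Int), a + 1 ≤ (k : Int) →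
      a ≤ (tl.length : Int) - ((Lm + 1 : Nat) : Int) - 1 →
      (∀ j : Nat, a < (j : Int) → m.getD j 0 = ((pvMN tl Lm j : Nat) : Int)) →
      (∀ j : Nat, (j : Int) ≤ a → m.getD j 0 = 0) →
      m.length = tl.length + 1 →
      ∀ j : Nat,
        ((PySem.List.pyRange a (-1) (-1)).foldl (pvMStep tl ((Lm + 1 : Nat) : Int)) m).getD j 0
          = ((pvMN tl Lm j : Nat) : Int) := by
  intro k
  induction k with
  | zero =>
    intro a m hk ha hup hlow hlen j
    rw [PySem.List.pyRange_neg_one_eq_nil (by omega : a ≤ -1)]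
    exact hup j (by omega)
  | succ k ih =>
    intro a m hk ha hup hlow hlen j
    by_cases ha0 : a ≤ -1
    · rw [PySem.List.pyRange_neg_one_eq_nil ha0]
      exact hup j (by omega)
    · rw [PySem.List.pyRange_neg_one_cons (by omega : (-1 : Int) < a), List.foldl_cons]
      have ham : a = ((a.toNat : Nat) : Int) := (Int.toNat_of_nonneg (by omega)).symm
      have habound : a.toNat + (Lm + 1) < tl.length := by omega
      -- evaluate the step's condition as a statement about getD
      have e1 : PySem.List.pyGet? tl a = some tl[a.toNat] := by
        conv_lhs => rw [ham]
        rw [PySem.List.pyGet?_natCast]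
        exact List.getElem?_eq_getElem (by omega)
      have e2 : PySem.List.pyGet? tl (a + ((Lm + 1 : Nat) : Int))
          = some tl[a.toNat + (Lm + 1)] := by
        conv_lhs => rw [show a + ((Lm + 1 : Nat) : Int) = (((a.toNat + (Lm + 1)) : Nat) : Int) by omega]
        rw [PySem.List.pyGet?_natCast]
        exact List.getElem?_eq_getElem habound
      have hstepc : (PySem.List.pyGet? tl a = PySem.List.pyGet? tl (a + ((Lm + 1 : Nat) : Int)))
          ↔ tl.getD a.toNat ' ' = tl.getD (a.toNat + (Lm + 1)) ' ' := by
        rw [e1, e2, List.getD_eq_getElem tl ' ' (by omega : a.toNat < tl.length),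
          List.getD_eq_getElem tl ' ' habound]
        simp
      refine ih (a - 1) (pvMStep tl ((Lm + 1 : Nat) : Int) m a) (by omega) (by omega) ?_ ?_ ?_ j
      · -- above a-1: entries are pvMN
        intro j' hj'
        by_cases hja : (j' : Int) = a
        · have hjn : j' = a.toNat := by omega
          subst hjn
          unfold pvMStep
          by_cases hcond : PySem.List.pyGet? tl a = PySem.List.pyGet? tl (a + ((Lm + 1 : Nat) : Int))
          · rw [if_pos hcond]
            have hget : (m.set a.toNat (m.getD (a + 1).toNat 0 + 1)).getD a.toNat 0
                = m.getD (a + 1).toNat 0 + 1 := by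
              rw [List.getD_eq_getElem?_getD, List.getElem?_set_self (by omega)]
              simp
            rw [hget]
            have hnext : m.getD (a + 1).toNat 0 = ((pvMN tl Lm (a.toNat + 1) : Nat) : Int) := by
              rw [show (a + 1).toNat = a.toNat + 1 by omega]
              exact hup (a.toNat + 1) (by omega)
            rw [hnext]
            have hmn : pvMN tl Lm a.toNat = pvMN tl Lm (a.toNat + 1) + 1 := by
              rw [pvMN, dif_pos ⟨habound, hstepc.mp hcond⟩]
            rw [hmn]
            push_cast
            ring
          · rw [if_neg hcond]
            have hmn : pvMN tl Lm a.toNat = 0 := by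
              rw [pvMN, dif_neg]
              intro hcc
              exact hcond (hstepc.mpr hcc.2)
            rw [hmn, hlow a.toNat (by omega)]
            simp
        · have hja' : a < (j' : Int) := by omega
          have hne : a.toNat ≠ j' := by omega
          have hstep : (pvMStep tl ((Lm + 1 : Nat) : Int) m a).getD j' 0 = m.getD j' 0 := by
            unfold pvMStep
            split_ifs <;>
              simp [List.getD_eq_getElem?_getD, List.getElem?_set_ne hne]
          rw [hstep]
          exact hup j' hja'
      · -- at or below a-1: entries still 0
        intro j' hj'
        have hne : a.toNat ≠ j' := by omega
        have hstep : (pvMStep tl ((Lm + 1 : Nat) : Int) m a).getD j' 0 = m.getD j' 0 := by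
          unfold pvMStep
          split_ifs <;>
            simp [List.getD_eq_getElem?_getD, List.getElem?_set_ne hne]
        rw [hstep]
        exact hlow j' (by omega)
      · unfold pvMStep
        split_ifs <;> simp [hlen]

-- the per-length inner loops agree: A's rescan count equals B's 1 + m[i] // L
theorem pv_inner (tl : List Char) (Lm : Nat) (st : Int × List Char) :
    (PySem.List.pyRange 0 ((tl.length : Int) - ((Lm + 1 : Nat) : Int) * 2) 1).foldl
      (fun st2 i =>
        let substring := PySem.List.slice tl (some i) (some (i + ((Lm + 1 : Nat) : Int)))
        if PySem.Chars.strIsspace substring then st2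
        else
          let repeat_count := pvWhileA tl ((Lm + 1 : Nat) : Int) substring (tl.length + 1) 0 i
          if st2.1 < repeat_count then (repeat_count, substring) else st2)
      st
    = (PySem.List.pyRange 0 ((tl.length : Int) - 2 * ((Lm + 1 : Nat) : Int)) 1).foldl
      (fun st2 i =>
        let c := 1 + PySem.Int.floordiv
          ((pvCharMatches tl ((Lm + 1 : Nat) : Int)).getD i.toNat 0) ((Lm + 1 : Nat) : Int)
        if st2.1 < c then
          let s := PySem.List.slice tl (some i) (some (i + ((Lm + 1 : Nat) : Int)))
          if ¬ PySem.Chars.strIsspace s then (c, s) else st2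
        else st2)
      st := by
  rw [show (tl.length : Int) - ((Lm + 1 : Nat) : Int) * 2
      = (tl.length : Int) - 2 * ((Lm + 1 : Nat) : Int) by ring]
  refine PySem.List.foldl_congr_mem _ _ _ _ ?_
  intro st2 i hi
  rw [PySem.List.mem_pyRange_one] at hi
  have hj : i = ((i.toNat : Nat) : Int) := (Int.toNat_of_nonneg hi.1).symm
  have hjb : i.toNat + 2 * (Lm + 1) ≤ tl.length := by omega
  rw [hj]
  simp only []
  rw [show (((i.toNat : Nat) : Int) + ((Lm + 1 : Nat) : Int))
      = (((i.toNat + (Lm + 1)) : Nat) : Int) by push_cast; ring]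
  rw [show PySem.List.slice tl (some ((i.toNat : Nat) : Int))
        (some (((i.toNat + (Lm + 1) : Nat)) : Int))
      = (tl.drop i.toNat).take (Lm + 1) by
    rw [show (((i.toNat + (Lm + 1)) : Nat) : Int) = ((i.toNat : Int) + ((Lm + 1 : Nat) : Int)) by
      push_cast; ring]
    exact PySem.List.slice_natCast_add tl i.toNat (Lm + 1)]
  have hcnt : pvWhileA tl ((Lm + 1 : Nat) : Int) ((tl.drop i.toNat).take (Lm + 1))
      (tl.length + 1) 0 ((i.toNat : Nat) : Int) = pvCntN tl Lm i.toNat := by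
    rw [pvWhileA_eq_cntA tl Lm _ (tl.length + 1) i.toNat 0 (by omega)]
    rw [pvCntA_eq_cntN tl Lm tl.length i.toNat (by omega) (by omega)]
    ring
  have htab : (pvCharMatches tl ((Lm + 1 : Nat) : Int)).getD ((i.toNat : Nat) : Int).toNat 0
      = ((pvMN tl Lm i.toNat : Nat) : Int) := by
    rw [Int.toNat_natCast]
    unfold pvCharMatches
    refine pv_table tl Lm (tl.length + 1) ((tl.length : Int) - ((Lm + 1 : Nat) : Int) - 1)
      (List.replicate (tl.length + 1) 0) (by push_cast; omega) (by omega) ?_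
      (fun j _ => pv_getD_replicate0 _ j) (by simp) i.toNat
    intro j0 h1
    rw [pv_getD_replicate0, pvMN, dif_neg (fun hc => absurd hc.1 (by omega))]
    simp
  have hfloor : (1 : Int) + PySem.Int.floordiv ((pvMN tl Lm i.toNat : Nat) : Int) ((Lm + 1 : Nat) : Int)
      = 1 + ((pvMN tl Lm i.toNat / (Lm + 1) : Nat) : Int) := by
    rw [PySem.Int.floordiv_eq_ediv_of_pos (by positivity)]
    norm_num [Int.natCast_div]
  have hcn : pvCntN tl Lm i.toNat
      = 1 + ((pvMN tl Lm i.toNat / (Lm + 1) : Nat) : Int) :=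
    pvCnt_eq_div tl Lm tl.length i.toNat (by omega) (by omega)
  rw [hcnt, htab, hfloor, ← hcn]
  by_cases hsp : PySem.Chars.strIsspace ((tl.drop i.toNat).take (Lm + 1))
  · rw [if_pos hsp]
    by_cases hlt : st2.1 < pvCntN tl Lm i.toNat
    · rw [if_pos hlt, if_neg (not_not_intro hsp)]
    · rw [if_neg hlt]
  · rw [if_neg hsp]
    by_cases hlt : st2.1 < pvCntN tl Lm i.toNat
    · rw [if_pos hlt, if_pos hlt, if_pos (by exact hsp)]
    · rw [if_neg hlt, if_neg hlt]

-- both ports agree for every admissible pair of length bounds (tl is the lowered text)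
theorem pv_main (tl : List Char) (mn mx : Int)
    (h : 1 ≤ mn ∨ min mx (PySem.Int.floordiv (tl.length : Int) 2) ≤ mn) :
    (fun r : Int × List Char => (decide ((5 : Int) ≤ r.1), String.mk r.2, r.1))
      ((PySem.List.pyRange mn (min mx (PySem.Int.floordiv (tl.length : Int) 2)) 1).foldl
        (fun st L =>
          (PySem.List.pyRange 0 ((tl.length : Int) - L * 2) 1).foldl
            (fun st2 i =>
              let substring := PySem.List.slice tl (some i) (some (i + L))
              if PySem.Chars.strIsspace substring then st2
              else
                let repeat_count := pvWhileA tl L substring (tl.length + 1) 0 i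
                if st2.1 < repeat_count then (repeat_count, substring) else st2)
            st)
        ((0 : Int), ([] : List Char)))
    = (fun r : Int × List Char => (decide ((5 : Int) ≤ r.1), String.mk r.2, r.1))
      ((PySem.List.pyRange mn (min mx (PySem.Int.floordiv (tl.length : Int) 2)) 1).foldl
        (fun best L =>
          let m := pvCharMatches tl L
          (PySem.List.pyRange 0 ((tl.length : Int) - 2 * L) 1).foldl
            (fun best i =>
              let c := 1 + PySem.Int.floordiv (m.getD i.toNat 0) L
              if best.1 < c then
                let s := PySem.List.slice tl (some i) (some (i + L))
                if ¬ PySem.Chars.strIsspace s then (c, s) else best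
              else best)
            best)
        ((0 : Int), ([] : List Char))) := by
  rcases h with h1 | h2
  · refine congrArg (fun r : Int × List Char => (decide ((5 : Int) ≤ r.1), String.mk r.2, r.1))
      (PySem.List.foldl_congr_mem _ _ _ _ ?_)
    intro st L hL
    rw [PySem.List.mem_pyRange_one] at hL
    have hL1 : 1 ≤ L := le_trans h1 hL.1
    have hLm : L = (((L.toNat - 1) + 1 : Nat) : Int) := by omega
    rw [hLm]
    exact pv_inner tl (L.toNat - 1) st
  · rw [PySem.List.pyRange_one_eq_nil h2]
    rfl

-- ===== VERDICT (by name: the statement is the Claim_ definition above) =====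
theorem find_repeated_substring_spec : Claim_equal_find_repeated_substring := by
  intro text min_length max_length _ hpre
  unfold Spec_find_repeated_substring
  have hlen : PySem.Str.len text = (((PySem.Str.lower text).toList.length : Nat) : Int) := by
    simp [PySem.Str.toList_lower, PySem.Chars.lower, PySem.Str.len_eq]
  rw [Pre_find_repeated_substring, hlen] at hpre
  exact pv_main ((PySem.Str.lower text).toList) min_length max_length hpre
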